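-- pv_equiv track=rewrite | github.com/stat-thon/Coding-Test-Study-2nd | Dawny/Programmers/14TH/LV3/bestset.py | solution
-- ===== SOURCE A (Python) =====
-- def solution(n, s):
--     if n > s:
--         return [-1]
--     p, q = divmod(s, n)
--     l = [p]*n
--     if q != 0:
--         for i in range(n-1, n-q-1, -1):
--             l[i] += 1
--
--     return l
-- ===== SOURCE B (Python) =====
-- def solution(n, s):
--     if n > s:
--         return [-1]
--     return [(s + i) // n for i in range(n)]
-- ===== Notes on version B (the rewrite author's own statement) =====
-- stated objective: simpler
-- what changed: Drops divmod and the allocate-then-patch loop entirely: each element is computed directly by the closed per-index formula (s+i)//n for i in range(n), which is p for the first n-q indices and p+1 for the last q.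
import Mathlib
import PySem

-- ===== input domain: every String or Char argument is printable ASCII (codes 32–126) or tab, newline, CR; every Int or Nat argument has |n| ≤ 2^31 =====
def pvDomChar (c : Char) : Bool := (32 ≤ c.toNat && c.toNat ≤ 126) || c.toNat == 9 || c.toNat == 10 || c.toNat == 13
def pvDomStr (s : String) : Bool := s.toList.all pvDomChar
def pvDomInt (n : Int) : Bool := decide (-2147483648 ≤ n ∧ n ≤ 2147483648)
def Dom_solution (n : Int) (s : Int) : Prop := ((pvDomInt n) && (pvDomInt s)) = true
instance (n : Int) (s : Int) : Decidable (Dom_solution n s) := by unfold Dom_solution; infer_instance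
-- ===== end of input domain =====

-- B drops divmod and the patch loop: each list element is the closed per-index formula (s+i)//n (objective: simpler).

-- ===== PORT A =====
-- 'l[i] += 1': inside Pre_ the loop indices are always nonnegative and in range
-- (the loop is nonempty only when q > 0, hence n > 0, and then n-q ≤ i ≤ n-1),
-- so the set/getD at i.toNat is exact there.
def solution (n : Int) (s : Int) : List Int :=
  if n > s then [-1]
  else
    let p := PySem.Int.floordiv s n
    let q := PySem.Int.mod s n
    let l := Array.replicate n.toNat p    -- Python's mutable list
    (if q ≠ 0 then
      (PySem.List.pyRange (n - 1) (n - q - 1) (-1)).foldl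
        (fun l i =>
          let v := l.getD i.toNat 0       -- l[i]
          l.setIfInBounds i.toNat (v + 1)) l
     else l).toList

-- ===== PORT B =====
def solution_alt (n : Int) (s : Int) : List Int :=
  if n > s then [-1]
  else (PySem.List.pyRange 0 n 1).map (fun i => PySem.Int.floordiv (s + i) n)

-- ===== PRECONDITION & SPEC =====
-- Pre_ excludes exactly n = 0 with n ≤ s (i.e. 0 ≤ s), where Python's divmod(s, 0) raises ZeroDivisionError.
def Pre_solution (n : Int) (s : Int) : Prop := n ≠ 0 ∨ n > s
instance (n : Int) (s : Int) : Decidable (Pre_solution n s) := by unfold Pre_solution; infer_instance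
def pvWitness_solution : Int × Int := (3, 7)

def Spec_solution (n : Int) (s : Int) (out : List Int) : Prop := out = solution_alt n s
instance (n : Int) (s : Int) (out : List Int) : Decidable (Spec_solution n s out) := by unfold Spec_solution; infer_instance

-- ===== CLAIM (what is proved, stated in full; the proofs are below) =====
def Claim_equal_solution : Prop := ∀ (n : Int) (s : Int), Dom_solution n s → Pre_solution n s → Spec_solution n s (solution n s)

-- ===== LEMMAS AND PROOFS =====

-- the increment step of A's loop
def pvInc (l : List Int) (i : Int) : List Int := l.set i.toNat (l.getD i.toNat 0 + 1)

-- A's patch loop, applied to the last t of m copies of p, yields the block form.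
theorem pv_fold_inc (p : Int) : ∀ (t m : Nat), t ≤ m →
    (PySem.List.pyRange ((m : Int) - 1) ((m : Int) - (t : Int) - 1) (-1)).foldl pvInc
      (List.replicate m p)
    = List.replicate (m - t) p ++ List.replicate t (p + 1) := by
  intro t
  induction t with
  | zero =>
    intro m _
    simp
  | succ t ih =>
    intro m hm
    have hsplit : PySem.List.pyRange ((m : Int) - 1) ((m : Int) - ((t+1 : Nat) : Int) - 1) (-1)
        = PySem.List.pyRange ((m : Int) - 1) ((m : Int) - (t : Int) - 1) (-1)
          ++ [(m : Int) - ((t+1 : Nat) : Int)] := by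
      rw [PySem.List.pyRange_neg_one_eq_reverse, PySem.List.pyRange_neg_one_eq_reverse,
        PySem.List.pyRange_one_cons (by push_cast; omega)]
      simp
      have harg : (m : Int) - ((t:Int) + 1) + 1 = (m : Int) - (t:Int) := by ring
      rw [harg]
    rw [hsplit, List.foldl_append, ih m (by omega)]
    have hidx : ((m : Int) - ((t+1 : Nat) : Int)).toNat = m - t - 1 := by push_cast; omega
    have hlen : m - t = (m - t - 1) + 1 := by omega
    simp only [pvInc, List.foldl, hidx]
    have hget : (List.replicate (m - t) p ++ List.replicate t (p + 1)).getD (m - t - 1) 0 = p := by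
      rw [List.getD_eq_getElem?_getD, List.getElem?_append_left (by simp; omega),
        List.getElem?_replicate]
      simp [(by omega : m - t - 1 < m - t)]
    rw [hget]
    conv_lhs => rw [hlen, List.replicate_succ']
    rw [List.append_assoc, List.set_append_right _ _ (by simp), List.length_replicate]
    simp [List.replicate_succ, Nat.sub_sub]

-- Array.getD read through toList
theorem pv_getD (a : Array Int) (i : Nat) (d : Int) : a.getD i d = a.toList.getD i d := by
  rw [List.getD_eq_getElem?_getD, Array.getElem?_toList]
  unfold Array.getD
  split
  · rename_i h; simp [Array.getElem?_eq_getElem h]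
  · rename_i h; simp [Array.getElem?_eq_none (by omega : a.size ≤ i)]

-- A's array loop, seen through toList, is the list loop pvInc
theorem pv_array_bridge (xs : List Int) (a : Array Int) :
    (xs.foldl (fun l i => let v := l.getD i.toNat 0; l.setIfInBounds i.toNat (v + 1)) a).toList
    = xs.foldl pvInc a.toList := by
  induction xs generalizing a with
  | nil => rfl
  | cons x xs ih =>
    simp only [List.foldl]
    rw [ih]
    congr 1
    simp only [pvInc, Array.toList_setIfInBounds, pv_getD]

-- A's side, n > 0, q ≠ 0: the patched list is the block form
theorem pv_main (p q n : Int) (h1 : 0 < n) (h2 : 0 ≤ q) (h3 : q < n) :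
    (PySem.List.pyRange (n - 1) (n - q - 1) (-1)).foldl pvInc (List.replicate n.toNat p)
    = List.replicate (n - q).toNat p ++ List.replicate q.toNat (p + 1) := by
  have hmn : ((n.toNat : Int)) = n := by omega
  have hmt : ((q.toNat : Int)) = q := by omega
  have h := pv_fold_inc p q.toNat n.toNat (by omega)
  rw [hmn, hmt] at h
  have hnq : (n - q).toNat = n.toNat - q.toNat := by omega
  rw [h, hnq]

-- B's side, n > 0: the per-index formula produces the same block form
theorem pv_b_main (n s : Int) (hpos : 0 < n) :
    (PySem.List.pyRange 0 n 1).map (fun i => PySem.Int.floordiv (s + i) n)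
    = List.replicate (n - PySem.Int.mod s n).toNat (PySem.Int.floordiv s n)
      ++ List.replicate (PySem.Int.mod s n).toNat (PySem.Int.floordiv s n + 1) := by
  set p := PySem.Int.floordiv s n with hp
  set q := PySem.Int.mod s n with hq
  have hdm : p * n + q = s := PySem.Int.floordiv_mul_add_mod s n
  have hq0 : 0 ≤ q := PySem.Int.mod_nonneg s hpos
  have hqn : q < n := PySem.Int.mod_lt s hpos
  apply List.ext_getElem
  · simp [PySem.List.length_pyRange_one]
    omega
  · intro k hk1 hk2
    rw [List.getElem_map, PySem.List.getElem_pyRange_one]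
    have hkn : (k : Int) < n := by
      have := hk1; simp [PySem.List.length_pyRange_one] at this; omega
    by_cases hcase : k < (n - q).toNat
    · rw [List.getElem_append_left (by simpa using hcase), List.getElem_replicate]
      rw [PySem.Int.floordiv_eq_iff_of_pos hpos]
      constructor <;> [nlinarith [hdm]; nlinarith [hdm, (by omega : (k:Int) < n - q)]]
    · rw [List.getElem_append_right (by simpa using hcase), List.getElem_replicate]
      rw [PySem.Int.floordiv_eq_iff_of_pos hpos]
      have hk' : n - q ≤ (k : Int) := by omega
      constructor <;> nlinarith [hdm]

theorem pv_eq (n s : Int) (hpre : Pre_solution n s) : solution n s = solution_alt n s := by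
  by_cases hns : n > s
  · simp [solution, solution_alt, hns]
  · simp only [solution, solution_alt, if_neg hns]
    have hn0 : n ≠ 0 := by
      rcases hpre with h | h
      · exact h
      · exact absurd h hns
    by_cases hneg : n < 0
    · -- n < 0: both sides are []
      have hb := PySem.Int.mod_neg_bounds s hneg
      by_cases hq0 : PySem.Int.mod s n = 0 <;>
        simp [hq0, PySem.List.pyRange_one_eq_nil (by omega : n ≤ (0:Int)),
          PySem.List.pyRange_neg_one_eq_nil
            (by omega : n - 1 ≤ n - PySem.Int.mod s n - 1),
          (by omega : n.toNat = 0)]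
    · have hpos : 0 < n := by omega
      rw [pv_b_main n s hpos]
      by_cases hq0 : PySem.Int.mod s n = 0
      · simp [hq0]
      · simp only [hq0, ne_eq, not_false_eq_true, if_true]
        rw [pv_array_bridge, Array.toList_replicate]
        exact pv_main (PySem.Int.floordiv s n) (PySem.Int.mod s n) n hpos
          (PySem.Int.mod_nonneg s hpos) (PySem.Int.mod_lt s hpos)

theorem pv_witness : Dom_solution pvWitness_solution.1 pvWitness_solution.2 ∧
    Pre_solution pvWitness_solution.1 pvWitness_solution.2 := by decide

-- ===== VERDICT (by name: the statement is the Claim_ definition above) =====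
theorem solution_spec : Claim_equal_solution := by
  intro n s _ hpre
  exact pv_eq n s hpre
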